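-- pv_equiv track=rewrite | github.com/jnhu76/hash_join_cpp | verification/verify_refactor.py | _compare_output
-- ===== SOURCE A (Python) =====
-- def _compare_output(output1: str, output2: str, strict: bool) -> bool:
--     """比较输出"""
--     if strict:
--         # 严格模式：精确匹配（忽略空白差异）
--         lines1 = [l.strip() for l in output1.strip().split('\n') if l.strip()]
--         lines2 = [l.strip() for l in output2.strip().split('\n') if l.strip()]
--         return lines1 == lines2
--     else:
--         # 宽松模式：排序后比较
--         lines1 = sorted(l.strip() for l in output1.strip().split('\n') if l.strip())
--         lines2 = sorted(l.strip() for l in output2.strip().split('\n') if l.strip())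
--         return lines1 == lines2
-- ===== SOURCE B (Python) =====
-- from collections import Counter
--
--
-- def _clean(output: str) -> list:
--     return [l.strip() for l in output.strip().split('\n') if l.strip()]
--
--
-- def _compare_output(output1: str, output2: str, strict: bool) -> bool:
--     lines1 = _clean(output1)
--     lines2 = _clean(output2)
--     if strict:
--         return lines1 == lines2
--     return Counter(lines1) == Counter(lines2)
-- ===== Notes on version B (the rewrite author's own statement) =====
-- stated objective: faster
-- what changed: Loose mode compares Counter multisets of the cleaned lines instead of sorting both line lists and comparing; strict mode keeps plain list equality.
import Mathlib
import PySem

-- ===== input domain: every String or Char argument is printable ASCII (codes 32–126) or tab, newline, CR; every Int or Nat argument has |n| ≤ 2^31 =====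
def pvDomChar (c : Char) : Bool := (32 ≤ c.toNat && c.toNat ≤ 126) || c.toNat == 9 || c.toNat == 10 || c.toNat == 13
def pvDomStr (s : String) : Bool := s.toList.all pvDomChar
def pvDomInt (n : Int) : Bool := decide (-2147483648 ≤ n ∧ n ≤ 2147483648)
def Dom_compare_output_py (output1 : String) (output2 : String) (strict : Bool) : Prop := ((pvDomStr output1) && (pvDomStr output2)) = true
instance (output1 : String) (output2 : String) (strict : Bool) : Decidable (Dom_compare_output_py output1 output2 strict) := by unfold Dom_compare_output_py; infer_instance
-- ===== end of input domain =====

-- B replaces loose-mode sort-and-compare by Counter-multiset comparison (objective: faster, counting instead of sorting).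

-- ===== PORT A =====
def compare_output_py (output1 : String) (output2 : String) (strict : Bool) : Bool :=
  if strict then
    let lines1 := (((PySem.Str.split? (PySem.Str.strip output1) "\n").getD []).filter
        (fun l => PySem.Str.strip l != "")).map PySem.Str.strip
    let lines2 := (((PySem.Str.split? (PySem.Str.strip output2) "\n").getD []).filter
        (fun l => PySem.Str.strip l != "")).map PySem.Str.strip
    lines1 == lines2
  else
    let lines1 := PySem.List.sorted ((((PySem.Str.split? (PySem.Str.strip output1) "\n").getD []).filter
        (fun l => PySem.Str.strip l != "")).map PySem.Str.strip) (fun x => x) false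
    let lines2 := PySem.List.sorted ((((PySem.Str.split? (PySem.Str.strip output2) "\n").getD []).filter
        (fun l => PySem.Str.strip l != "")).map PySem.Str.strip) (fun x => x) false
    lines1 == lines2

-- ===== PORT B =====
-- Source B's _clean helper
def pvClean (output : String) : List String :=
  (((PySem.Str.split? (PySem.Str.strip output) "\n").getD []).filter
      (fun l => PySem.Str.strip l != "")).map PySem.Str.strip

-- Python's Counter(..) == Counter(..): dict equality = same key set and equal value at each key
def pvCounterEq (d1 d2 : PySem.Dict String Int) : Bool :=
  PySem.Set.equal d1.keys d2.keys && d1.keys.all (fun k => d1.getD k 0 == d2.getD k 0)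

def compare_output_py_alt (output1 : String) (output2 : String) (strict : Bool) : Bool :=
  let lines1 := pvClean output1
  let lines2 := pvClean output2
  if strict then
    lines1 == lines2
  else
    pvCounterEq (PySem.Dict.counter lines1) (PySem.Dict.counter lines2)

-- ===== PRECONDITION & SPEC =====
def Spec_compare_output_py (output1 : String) (output2 : String) (strict : Bool) (out : Bool) : Prop := out = compare_output_py_alt output1 output2 strict
instance (output1 : String) (output2 : String) (strict : Bool) (out : Bool) : Decidable (Spec_compare_output_py output1 output2 strict out) := by unfold Spec_compare_output_py; infer_instance

-- ===== CLAIM (what is proved, stated in full; the proofs are below) =====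
def Claim_equal_compare_output_py : Prop := ∀ (output1 : String) (output2 : String) (strict : Bool), Dom_compare_output_py output1 output2 strict → Spec_compare_output_py output1 output2 strict (compare_output_py output1 output2 strict)

-- ===== LEMMAS AND PROOFS =====

-- Counter equality is multiset (permutation) equality
lemma pvCounterEq_iff (l1 l2 : List String) :
    pvCounterEq (PySem.Dict.counter l1) (PySem.Dict.counter l2) = true ↔ l1.Perm l2 := by
  unfold pvCounterEq
  simp only [Bool.and_eq_true, PySem.Set.equal_iff, PySem.Dict.keys_counter,
    PySem.Set.mem_ofList, List.all_eq_true, PySem.Dict.getD_counter, beq_iff_eq,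
    List.perm_iff_count]
  constructor
  · rintro ⟨hkeys, hvals⟩ v
    by_cases hv : v ∈ l1
    · exact_mod_cast hvals v hv
    · have hv2 : v ∉ l2 := fun h => hv ((hkeys v).mpr h)
      simp [List.count_eq_zero.mpr hv, List.count_eq_zero.mpr hv2]
  · intro h
    refine ⟨fun v => ?_, fun v _ => by exact_mod_cast h v⟩
    constructor <;> intro hv <;>
      [exact List.count_pos_iff.mp (h v ▸ List.count_pos_iff.mpr hv);
       exact List.count_pos_iff.mp ((h v).symm ▸ List.count_pos_iff.mpr hv)]

-- ===== VERDICT (by name: the statement is the Claim_ definition above) =====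
theorem compare_output_py_spec : Claim_equal_compare_output_py := by
  intro output1 output2 strict _
  unfold Spec_compare_output_py
  cases strict with
  | true => simp only [compare_output_py, compare_output_py_alt, pvClean, if_true]
  | false =>
    simp only [compare_output_py, compare_output_py_alt, pvClean,
      Bool.false_eq_true, if_false]
    rw [Bool.eq_iff_iff, beq_iff_eq, pvCounterEq_iff,
      PySem.List.sorted_id_eq_sorted_id_iff_perm]
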